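-- pv_equiv track=rewrite | github.com/socialfoundations/backward_baselines | baselines.py | list_aggregator
-- ===== SOURCE A (Python) =====
-- def list_aggregator(results_list):
--     """Aggregate results by keeping a list of values."""
--     res = {}
--     results = results_list[0]
--     for model in results.keys():
--         res[model] = {}
--         for test in results[model]:
--             res[model][test] = [r[model][test] for r in results_list]
--     return res
-- ===== SOURCE B (Python) =====
-- def list_aggregator(results_list):
--     """Aggregate results by keeping a list of values (single forward pass)."""
--     res = {model: {test: [] for test in tests}
--            for model, tests in results_list[0].items()}
--     for r in results_list:
--         for model, tests in res.items():
--             for test in tests: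
--                 tests[test].append(r[model][test])
--     return res
-- ===== Notes on version B (the rewrite author's own statement) =====
-- stated objective: alternative
-- what changed: Inverted the loop nesting: instead of one full rescan of results_list per (model,test) comprehension, B pre-builds a nested skeleton of empty lists from results_list[0] and fills it in a single forward accumulating pass over results_list.
import Mathlib
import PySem

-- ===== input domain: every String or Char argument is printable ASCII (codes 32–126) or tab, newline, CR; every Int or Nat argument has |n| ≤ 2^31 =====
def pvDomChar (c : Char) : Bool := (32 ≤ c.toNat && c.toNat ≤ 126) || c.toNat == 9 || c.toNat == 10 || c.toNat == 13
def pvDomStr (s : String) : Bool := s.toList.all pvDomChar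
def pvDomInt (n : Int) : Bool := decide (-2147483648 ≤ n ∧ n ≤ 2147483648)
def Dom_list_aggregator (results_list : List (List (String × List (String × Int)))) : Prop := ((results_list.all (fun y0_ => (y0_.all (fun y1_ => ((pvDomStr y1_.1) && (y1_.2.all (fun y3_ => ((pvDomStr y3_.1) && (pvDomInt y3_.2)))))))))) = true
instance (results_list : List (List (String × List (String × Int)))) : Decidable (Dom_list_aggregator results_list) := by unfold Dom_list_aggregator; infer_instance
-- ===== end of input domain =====

-- B replaces A's per-(model,test) comprehensions, each rescanning results_list, by ONE forward
-- accumulating pass over results_list that appends into a pre-built skeleton of empty lists.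

-- ===== PORT A =====
-- r[model][test] as Python computes it, in total form: under Pre_ both lookups succeed
-- (inputs where Python would raise KeyError are excluded by Pre_, so the defaults are never read).
def pyGet2 (r : List (String × List (String × Int))) (model test : String) : Int :=
  (List.lookup test ((List.lookup model r).getD [])).getD 0

def list_aggregator (results_list : List (List (String × List (String × Int)))) : List (String × List (String × List Int)) :=
  match results_list with
  | [] => []  -- Python raises IndexError on results_list[0]; excluded by Pre_
  | results :: rest =>
    -- res = {}; for model in results.keys(): res[model] = {}; for test in results[model]:
    --   res[model][test] = [r[model][test] for r in results_list]
    ((results.map Prod.fst).foldl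
      (fun res model =>
        res.insert model
          (((((List.lookup model results).getD []).map Prod.fst).foldl
            (fun inner test =>
              inner.insert test ((results :: rest).map (fun r => pyGet2 r model test)))
            PySem.Dict.empty).items))
      (PySem.Dict.empty : PySem.Dict String (List (String × List Int)))).items

-- ===== PORT B =====
def list_aggregator_alt (results_list : List (List (String × List (String × Int)))) : List (String × List (String × List Int)) :=
  match results_list with
  | [] => []  -- Python B also raises IndexError here; excluded by Pre_
  | results :: rest =>
    -- res = {model: {test: [] for test in tests} for model, tests in results_list[0].items()}
    let init := results.map (fun mp => (mp.1, mp.2.map (fun tp => (tp.1, ([] : List Int)))))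
    -- for r in results_list: for model, tests in res.items(): for test in tests: tests[test].append(r[model][test])
    (results :: rest).foldl
      (fun res r =>
        res.map (fun mp => (mp.1, mp.2.map (fun tp => (tp.1, tp.2 ++ [pyGet2 r mp.1 tp.1])))))
      init

-- ===== PRECONDITION & SPEC =====
-- Pre_ excludes the empty list and inputs with a key of results_list[0] missing in some later dict
-- (Python A raises IndexError / KeyError there), and association lists with duplicate keys at either
-- level, which do not encode any Python dict value at all (Python dict keys are unique).
def Pre_list_aggregator (results_list : List (List (String × List (String × Int)))) : Prop :=
  results_list ≠ [] ∧
  (∀ r ∈ results_list,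
    (r.map Prod.fst).Nodup ∧ ∀ p ∈ r, (p.2.map Prod.fst).Nodup) ∧
  (∀ mp ∈ results_list.headI, ∀ tp ∈ mp.2, ∀ r ∈ results_list,
    (List.lookup mp.1 r).isSome = true ∧
    (List.lookup tp.1 ((List.lookup mp.1 r).getD [])).isSome = true)
instance (results_list : List (List (String × List (String × Int)))) : Decidable (Pre_list_aggregator results_list) := by unfold Pre_list_aggregator; infer_instance

def pvWitness_list_aggregator : (List (List (String × List (String × Int)))) :=
  [[("m", [("t", 1)])], [("m", [("t", 2)])]]

def Spec_list_aggregator (results_list : List (List (String × List (String × Int)))) (out : List (String × List (String × List Int))) : Prop := out = list_aggregator_alt results_list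
instance (results_list : List (List (String × List (String × Int)))) (out : List (String × List (String × List Int))) : Decidable (Spec_list_aggregator results_list out) := by unfold Spec_list_aggregator; infer_instance

-- ===== CLAIM (what is proved, stated in full; the proofs are below) =====
def Claim_equal_list_aggregator : Prop := ∀ (results_list : List (List (String × List (String × Int)))), Dom_list_aggregator results_list → Pre_list_aggregator results_list → Spec_list_aggregator results_list (list_aggregator results_list)

-- ===== LEMMAS AND PROOFS =====

-- the common closed form both ports reach
def cfAgg (results : List (String × List (String × Int)))
    (rl : List (List (String × List (String × Int)))) : List (String × List (String × List Int)) :=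
  results.map (fun mp => (mp.1, mp.2.map (fun tp => (tp.1, rl.map (fun r => pyGet2 r mp.1 tp.1)))))

-- first-match lookup of a pair's own key in a nodup-keyed association list
theorem lookup_self_of_nodup {β : Type} (l : List (String × β)) (p : String × β)
    (hnd : (l.map Prod.fst).Nodup) (hp : p ∈ l) : List.lookup p.1 l = some p.2 := by
  induction l with
  | nil => cases hp
  | cons q l ih =>
    simp only [List.map_cons, List.nodup_cons] at hnd
    rcases List.mem_cons.mp hp with h | h
    · subst h; simp [List.lookup]
    · have hne : p.1 ≠ q.1 := by
        intro he
        exact hnd.1 (he ▸ (List.mem_map.mpr ⟨p, h, rfl⟩))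
      have hb : (p.1 == q.1) = false := by simp [hne]
      simp [List.lookup, hb, ih hnd.2 h]

-- B's accumulating pass, in closed form
theorem alt_fold_closed (rs : List (List (String × List (String × Int))))
    (init : List (String × List (String × List Int))) :
    rs.foldl
      (fun res r =>
        res.map (fun mp => (mp.1, mp.2.map (fun tp => (tp.1, tp.2 ++ [pyGet2 r mp.1 tp.1])))))
      init
    = init.map (fun mp => (mp.1, mp.2.map (fun tp =>
        (tp.1, tp.2 ++ rs.map (fun r => pyGet2 r mp.1 tp.1))))) := by
  induction rs generalizing init with
  | nil => simp
  | cons r rs ih =>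
    simp only [List.foldl_cons, ih, List.map_map, List.map_cons]
    apply List.map_congr_left
    intro mp _
    simp [Function.comp, List.map_map, List.append_assoc]

theorem alt_eq_cf (results : List (String × List (String × Int)))
    (rest : List (List (String × List (String × Int)))) :
    list_aggregator_alt (results :: rest) = cfAgg results (results :: rest) := by
  simp only [list_aggregator_alt, alt_fold_closed, cfAgg, List.map_map]
  apply List.map_congr_left
  intro mp _
  simp [Function.comp, List.map_map]

-- the value A stores at res[model] (named so the proof can speak about A's inner loop)
def innerVal (results : List (String × List (String × Int)))
    (rl : List (List (String × List (String × Int)))) (model : String) : List (String × List Int) :=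
  ((((List.lookup model results).getD []).map Prod.fst).foldl
    (fun inner test => inner.insert test (rl.map (fun r => pyGet2 r model test)))
    PySem.Dict.empty).items

theorem a_eq_cf (results : List (String × List (String × Int)))
    (rest : List (List (String × List (String × Int))))
    (hnd : (results.map Prod.fst).Nodup)
    (hinner : ∀ p ∈ results, (p.2.map Prod.fst).Nodup) :
    list_aggregator (results :: rest) = cfAgg results (results :: rest) := by
  have hA : list_aggregator (results :: rest)
      = ((results.map Prod.fst).foldl
          (fun (res : PySem.Dict String (List (String × List Int))) m =>
            res.insert m (innerVal results (results :: rest) m))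
          PySem.Dict.empty).items := rfl
  have houter : ((results.map Prod.fst).foldl
        (fun (res : PySem.Dict String (List (String × List Int))) m =>
          res.insert m (innerVal results (results :: rest) m))
        PySem.Dict.empty).items
      = (PySem.Dict.empty : PySem.Dict String (List (String × List Int))).items
          ++ (results.map Prod.fst).map (fun m => (m, innerVal results (results :: rest) m)) :=
    PySem.Dict.items_foldl_insert_fresh _ _ _ _ (by intro a _; simp) (by simpa using hnd)
  rw [hA, houter]
  have he : (PySem.Dict.empty : PySem.Dict String (List (String × List Int))).items = [] := rfl
  rw [he, List.nil_append]
  simp only [List.map_map, cfAgg]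
  apply List.map_congr_left
  intro mp hmp
  have hlk : List.lookup mp.1 results = some mp.2 := lookup_self_of_nodup results mp hnd hmp
  have hin : innerVal results (results :: rest) mp.1
      = ((mp.2.map Prod.fst).foldl
          (fun (inner : PySem.Dict String (List Int)) t =>
            inner.insert t ((results :: rest).map (fun r => pyGet2 r mp.1 t)))
          PySem.Dict.empty).items := by
    simp [innerVal, hlk]
  have hfresh : ((mp.2.map Prod.fst).foldl
        (fun (inner : PySem.Dict String (List Int)) t =>
          inner.insert t ((results :: rest).map (fun r => pyGet2 r mp.1 t)))
        PySem.Dict.empty).items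
      = (PySem.Dict.empty : PySem.Dict String (List Int)).items
          ++ (mp.2.map Prod.fst).map (fun t => (t, (results :: rest).map (fun r => pyGet2 r mp.1 t))) :=
    PySem.Dict.items_foldl_insert_fresh _ _ _ _ (by intro a _; simp) (by simpa using hinner mp hmp)
  simp only [Function.comp]
  rw [hin, hfresh]
  have he2 : (PySem.Dict.empty : PySem.Dict String (List Int)).items = [] := rfl
  rw [he2, List.nil_append, List.map_map]
  rfl

-- ===== VERDICT (by name: the statement is the Claim_ definition above) =====
theorem list_aggregator_spec : Claim_equal_list_aggregator := by
  intro results_list _ hpre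
  unfold Spec_list_aggregator
  unfold Pre_list_aggregator at hpre
  match results_list with
  | [] => exact absurd hpre.1 (by simp)
  | results :: rest =>
    have hhead := hpre.2.1 results (by simp)
    rw [a_eq_cf results rest hhead.1 hhead.2, alt_eq_cf]
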